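-- pv_equiv track=rewrite | github.com/JEschete/EE627 | Homework/Midterm/score_optimization/optimize.py | flip_users
-- ===== SOURCE A (Python) =====
-- from collections import defaultdict
--
-- def group_by_user(rows):
--     users = defaultdict(list)
--     for key, label in rows:
--         uid, tid = key.split("_", 1)
--         users[uid].append((key, tid, label))
--     return dict(users)
--
-- def flatten_users(user_dict, user_order):
--     rows = []
--     for uid in user_order:
--         for key, tid, label in user_dict[uid]:
--             rows.append((key, label))
--     return rows
--
-- def get_user_order(rows):
--     seen = set()
--     order = []
--     for key, _ in rows:
--         uid = key.split("_", 1)[0]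
--         if uid not in seen:
--             seen.add(uid)
--             order.append(uid)
--     return order
--
-- def flip_users(current_rows, uids_to_flip):
--     """Generate new submission with specific users flipped."""
--     users = group_by_user(current_rows)
--     user_order = get_user_order(current_rows)
--
--     flip_set = set(uids_to_flip)
--     for uid in flip_set:
--         if uid in users:
--             users[uid] = [(key, tid, 1 - label)
--                           for key, tid, label in users[uid]]
--
--     return flatten_users(users, user_order)
-- ===== SOURCE B (Python) =====
-- def flip_users(current_rows, uids_to_flip):
--     """Generate new submission with specific users flipped."""
--     flip = set(uids_to_flip)
--     uid_of = lambda key: key.split("_", 1)[0]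
--     order = dict.fromkeys(uid_of(key) for key, _ in current_rows)
--     return [(key, 1 - label if uid_of(key) in flip else label)
--             for uid in order
--             for key, label in current_rows
--             if uid_of(key) == uid]
-- ===== Notes on version B (the rewrite author's own statement) =====
-- stated objective: simpler
-- what changed: Replaces A's group-by-user dict plus separate seen/order pass plus per-user flip loop plus flatten with an ordered dedup of uids and one filtering comprehension per user that flips labels inline via set membership.
import Mathlib
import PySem

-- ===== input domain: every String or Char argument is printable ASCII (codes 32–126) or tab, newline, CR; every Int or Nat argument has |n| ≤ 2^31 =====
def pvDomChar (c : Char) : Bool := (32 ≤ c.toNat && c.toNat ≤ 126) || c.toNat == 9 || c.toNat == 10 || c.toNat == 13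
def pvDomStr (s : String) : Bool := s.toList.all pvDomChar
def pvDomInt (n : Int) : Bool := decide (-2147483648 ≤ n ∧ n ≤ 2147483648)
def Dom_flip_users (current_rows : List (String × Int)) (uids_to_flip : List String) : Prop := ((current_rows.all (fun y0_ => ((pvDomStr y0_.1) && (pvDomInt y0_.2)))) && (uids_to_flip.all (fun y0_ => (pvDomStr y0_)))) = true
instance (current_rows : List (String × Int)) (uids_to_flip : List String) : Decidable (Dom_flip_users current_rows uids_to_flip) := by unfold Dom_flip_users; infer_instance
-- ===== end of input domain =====

-- B replaces A's group-by dict + order list + flatten by an ordered uid dedup with one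
-- filtering pass per user, flipping labels inline (objective: simpler).


-- shared helper: key.split("_", 1)[0]  (the same Python expression appears in both versions)
def pvUidOf (key : String) : String :=
  ((PySem.Str.splitMax? key "_" 1).getD []).getD 0 ""

-- ===== PORT A =====
-- 'uid, tid = key.split("_", 1)' raises ValueError unless exactly 2 parts → Option
def pvSplitA (key : String) : Option (String × String) :=
  match PySem.Str.splitMax? key "_" 1 with
  | some [u, t] => some (u, t)
  | _ => none

def pvGroupByUser (rows : List (String × Int)) :
    Option (PySem.Dict String (List (String × String × Int))) :=
  rows.foldl
    (fun acc r => acc.bind fun users =>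
      (pvSplitA r.1).map fun ut =>
        users.modify ut.1 [] (· ++ [(r.1, ut.2, r.2)]))
    (some PySem.Dict.empty)

def pvGetUserOrder (rows : List (String × Int)) : List String :=
  (rows.foldl
    (fun (st : PySem.Set String × List String) r =>
      let uid := pvUidOf r.1
      if PySem.Set.contains st.1 uid then st
      else (PySem.Set.add st.1 uid, st.2 ++ [uid]))
    (PySem.Set.empty, [])).2

def pvFlattenUsers (users : PySem.Dict String (List (String × String × Int)))
    (order : List String) : List (String × Int) :=
  order.foldl (fun acc uid =>
    acc ++ (users.getD uid []).map (fun t => (t.1, t.2.2))) []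

-- Python iterates 'for uid in flip_set' in hash order; the resulting dict does not depend on
-- that order (distinct keys are updated independently, in place), so iterating the PySem.Set's
-- list order is exact.
def flip_users (current_rows : List (String × Int)) (uids_to_flip : List String) : List (String × Int) :=
  match pvGroupByUser current_rows with
  | none => []   -- unreachable under Pre_flip_users: the Python raises ValueError here
  | some users0 =>
    let user_order := pvGetUserOrder current_rows
    let flip_set := PySem.Set.ofList uids_to_flip
    let users := flip_set.foldl
      (fun us uid =>
        if us.contains uid
        then us.insert uid ((us.getD uid []).map (fun t => (t.1, t.2.1, 1 - t.2.2)))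
        else us) users0
    pvFlattenUsers users user_order

-- ===== PORT B =====
def flip_users_alt (current_rows : List (String × Int)) (uids_to_flip : List String) : List (String × Int) :=
  let flip := PySem.Set.ofList uids_to_flip
  (PySem.List.dedup (current_rows.map fun r => pvUidOf r.1)).flatMap fun uid =>
    (current_rows.filter fun r => pvUidOf r.1 == uid).map fun r =>
      (r.1, if flip.contains (pvUidOf r.1) then 1 - r.2 else r.2)

-- ===== PRECONDITION & SPEC =====
-- Pre_ excludes exactly the inputs where A raises ValueError: a row key that key.split("_",1)
-- does not cut into two parts (i.e. a key containing no '_').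
def Pre_flip_users (current_rows : List (String × Int)) (uids_to_flip : List String) : Prop :=
  (current_rows.all (fun r => ((PySem.Str.splitMax? r.1 "_" 1).getD []).length == 2)) = true
instance (current_rows : List (String × Int)) (uids_to_flip : List String) : Decidable (Pre_flip_users current_rows uids_to_flip) := by unfold Pre_flip_users; infer_instance

def pvWitness_flip_users : (List (String × Int)) × List String := ([("u1_t1", 0), ("u2_t1", 1), ("u1_t2", 1)], ["u1"])

def Spec_flip_users (current_rows : List (String × Int)) (uids_to_flip : List String) (out : List (String × Int)) : Prop := out = flip_users_alt current_rows uids_to_flip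
instance (current_rows : List (String × Int)) (uids_to_flip : List String) (out : List (String × Int)) : Decidable (Spec_flip_users current_rows uids_to_flip out) := by unfold Spec_flip_users; infer_instance

-- ===== CLAIM (what is proved, stated in full; the proofs are below) =====
def Claim_equal_flip_users : Prop := ∀ (current_rows : List (String × Int)) (uids_to_flip : List String), Dom_flip_users current_rows uids_to_flip → Pre_flip_users current_rows uids_to_flip → Spec_flip_users current_rows uids_to_flip (flip_users current_rows uids_to_flip)

-- ===== LEMMAS AND PROOFS =====

-- the second split component, used only in the proofs
def pvTidOf (key : String) : String :=
  ((PySem.Str.splitMax? key "_" 1).getD []).getD 1 ""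

theorem pvSplitA_eq_of_two (k : String)
    (h : ((PySem.Str.splitMax? k "_" 1).getD []).length = 2) :
    pvSplitA k = some (pvUidOf k, pvTidOf k) := by
  unfold pvSplitA pvUidOf pvTidOf
  cases ho : PySem.Str.splitMax? k "_" 1 with
  | none => rw [ho] at h; simp at h
  | some l =>
    rw [ho] at h
    match l, h with
    | [u, t], _ => simp

theorem pvGroupByUser_eq (rows : List (String × Int))
    (h : (rows.all (fun r => ((PySem.Str.splitMax? r.1 "_" 1).getD []).length == 2)) = true) :
    pvGroupByUser rows =
      some (rows.foldl
        (fun d r => d.modify (pvUidOf r.1) [] (· ++ [(r.1, pvTidOf r.1, r.2)]))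
        PySem.Dict.empty) := by
  unfold pvGroupByUser
  generalize PySem.Dict.empty = d
  induction rows generalizing d with
  | nil => rfl
  | cons r rs ih =>
    simp only [List.all_cons, Bool.and_eq_true, beq_iff_eq] at h
    simp only [List.foldl_cons, pvSplitA_eq_of_two r.1 h.1]
    exact ih h.2 _

theorem group_getD (rows : List (String × Int)) (uid : String) :
    (rows.foldl
      (fun d r => d.modify (pvUidOf r.1) [] (· ++ [(r.1, pvTidOf r.1, r.2)]))
      PySem.Dict.empty).getD uid []
    = ((rows.filter fun r => pvUidOf r.1 == uid).map fun r => (r.1, pvTidOf r.1, r.2)) := by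
  rw [show (rows.foldl
      (fun d r => d.modify (pvUidOf r.1) [] (· ++ [(r.1, pvTidOf r.1, r.2)]))
      PySem.Dict.empty)
    = ((rows.map fun r => (pvUidOf r.1, (r.1, pvTidOf r.1, r.2))).foldl
        (fun d p => d.modify p.1 [] (· ++ [p.2])) PySem.Dict.empty) from by
      rw [List.foldl_map]]
  rw [PySem.Dict.getD_foldl_modify_append]
  simp [List.filter_map, Function.comp_def, List.map_map]

theorem flipfold_getD (S : List String) (hS : S.Nodup)
    (users : PySem.Dict String (List (String × String × Int))) (uid : String) :
    (S.foldl
      (fun us u =>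
        if us.contains u
        then us.insert u ((us.getD u []).map (fun t => (t.1, t.2.1, 1 - t.2.2)))
        else us) users).getD uid []
    = if uid ∈ S then (users.getD uid []).map (fun t => (t.1, t.2.1, 1 - t.2.2))
      else users.getD uid [] := by
  induction S generalizing users with
  | nil => simp
  | cons s S ih =>
    simp only [List.nodup_cons] at hS
    simp only [List.foldl_cons]
    rw [ih hS.2]
    by_cases huid : uid = s
    · subst huid
      simp only [if_neg hS.1, List.mem_cons, true_or, if_pos]
      by_cases hc : users.contains uid
      · rw [if_pos hc, PySem.Dict.getD_insert_self]
      · rw [if_neg hc, PySem.Dict.getD_of_not_contains _ _ (by simpa using hc)]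
        simp
    · have husers' : (if users.contains s = true
          then users.insert s ((users.getD s []).map (fun t => (t.1, t.2.1, 1 - t.2.2)))
          else users).getD uid [] = users.getD uid [] := by
        split
        · exact PySem.Dict.getD_insert_of_ne _ _ _ huid
        · rfl
      rw [husers']
      by_cases hS2 : uid ∈ S
      · simp [hS2, huid]
      · simp [hS2, huid]

theorem order_inv (rows : List (String × Int)) (s : PySem.Set String) :
    (rows.foldl
      (fun (st : PySem.Set String × List String) r =>
        let uid := pvUidOf r.1
        if PySem.Set.contains st.1 uid then st
        else (PySem.Set.add st.1 uid, st.2 ++ [uid]))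
      (s, s))
    = (rows.foldl (fun s r => PySem.Set.add s (pvUidOf r.1)) s,
       rows.foldl (fun s r => PySem.Set.add s (pvUidOf r.1)) s) := by
  induction rows generalizing s with
  | nil => rfl
  | cons r rs ih =>
    simp only [List.foldl_cons]
    by_cases hm : pvUidOf r.1 ∈ s
    · simpa [hm] using ih s
    · have hadd := PySem.Set.add_of_not_mem hm
      simp only [hadd]
      simpa [hm] using ih (s ++ [pvUidOf r.1])

theorem order_eq (rows : List (String × Int)) :
    pvGetUserOrder rows = PySem.List.dedup (rows.map fun r => pvUidOf r.1) := by
  unfold pvGetUserOrder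
  rw [show (PySem.Set.empty : PySem.Set String) = ([] : PySem.Set String) from rfl]
  rw [order_inv rows []]
  rw [← PySem.Set.update_map_eq_foldl_add, PySem.Set.update_nil_left]
  rfl

theorem flip_users_spec : Claim_equal_flip_users := by
  intro rows uids _ hpre
  unfold Spec_flip_users
  unfold Pre_flip_users at hpre
  unfold flip_users
  rw [pvGroupByUser_eq rows hpre]
  simp only
  unfold pvFlattenUsers
  rw [PySem.List.foldl_append_eq_flatMap, List.nil_append, order_eq]
  unfold flip_users_alt
  congr 1
  funext uid
  rw [flipfold_getD _ (PySem.Set.nodup_ofList uids) _ uid, group_getD]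
  have hmemfilter :
      ((rows.filter fun r => pvUidOf r.1 == uid).map fun r =>
        (r.1, if PySem.Set.contains (PySem.Set.ofList uids) (pvUidOf r.1) then 1 - r.2 else r.2))
      = ((rows.filter fun r => pvUidOf r.1 == uid).map fun r =>
        (r.1, if PySem.Set.contains (PySem.Set.ofList uids) uid then 1 - r.2 else r.2)) := by
    apply List.map_congr_left
    intro r hr
    have : pvUidOf r.1 = uid := by simpa using (List.mem_filter.mp hr).2
    rw [this]
  rw [hmemfilter]
  by_cases hm : uid ∈ PySem.Set.ofList uids
  · have hc : PySem.Set.contains (PySem.Set.ofList uids) uid = true :=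
      (PySem.Set.contains_iff _ _).mpr hm
    rw [if_pos hm, hc]
    simp [List.map_map, Function.comp_def]
  · have hc : PySem.Set.contains (PySem.Set.ofList uids) uid = false := by
      by_contra h
      exact hm ((PySem.Set.contains_iff _ _).mp (by simpa using h))
    rw [if_neg hm, hc]
    simp [List.map_map, Function.comp_def]
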